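-- pv_equiv track=rewrite | github.com/gASK13/AOC | 2023/05/05.py | break_ranges
-- ===== SOURCE A (Python) =====
-- def break_ranges(source_map, ranges):
--     # source_map ranges are include on both ends
--     # ranges in data are inclusive on both ends
--     retranges = []
--     while len(ranges) > 0:
--         start, end = ranges.pop()
--         found = False
--         for (s_start, s_end), shift in source_map.items():
--             # if it overlaps whole, cool
--             if s_start <= start and s_end >= end:
--                 retranges.append((start + shift, end + shift))
--                 found = True
--                 break
--             elif s_start > start and s_end < end:
--                 retranges.append((s_start + shift, s_end + shift))
--                 ranges.append((start, s_start - 1))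
--                 ranges.append((s_end + 1, end))
--                 found = True
--                 break
--             elif start < s_start <= end <= s_end:
--                 retranges.append((s_start + shift, end + shift))
--                 ranges.append((start, s_start - 1))
--                 found = True
--                 break
--             elif s_start <= start <= s_end < end:
--                 retranges.append((start + shift, s_end + shift))
--                 ranges.append((s_end + 1, end))
--                 found = True
--                 break
--         # add only when none matched
--         if not found:
--             retranges.append((start, end))
--     return retranges
-- ===== SOURCE B (Python) =====
-- # B: recursive splitter instead of an explicit worklist stack; like A it
-- # destructively empties `ranges` (same mutation side effect), return value equal.
-- def break_ranges(source_map, ranges):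
--     items = list(source_map.items())
--
--     def overlaps(item, start, end):
--         (s_start, s_end), _ = item
--         return ((s_start <= start and s_end >= end)
--                 or (s_start > start and s_end < end)
--                 or (start < s_start <= end <= s_end)
--                 or (s_start <= start <= s_end < end))
--
--     def process(start, end):
--         hit = next((it for it in items if overlaps(it, start, end)), None)
--         if hit is None:
--             return [(start, end)]
--         (s_start, s_end), shift = hit
--         if s_start <= start and s_end >= end:
--             return [(start + shift, end + shift)]
--         if s_start > start and s_end < end:
--             return ([(s_start + shift, s_end + shift)]
--                     + process(s_end + 1, end) + process(start, s_start - 1))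
--         if s_start > start:
--             return [(s_start + shift, end + shift)] + process(start, s_start - 1)
--         return [(start + shift, s_end + shift)] + process(s_end + 1, end)
--
--     out = []
--     while ranges:
--         start, end = ranges.pop()
--         out.extend(process(start, end))
--     return out
-- ===== Notes on version B (the rewrite author's own statement) =====
-- stated objective: alternative
-- what changed: The explicit worklist stack that re-pushes split fragments is replaced by a recursive process(start,end) that finds the first overlapping map entry (one first-match search instead of a four-branch scan with break) and concatenates the recursively processed fragments in LIFO order.
import Mathlib
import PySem

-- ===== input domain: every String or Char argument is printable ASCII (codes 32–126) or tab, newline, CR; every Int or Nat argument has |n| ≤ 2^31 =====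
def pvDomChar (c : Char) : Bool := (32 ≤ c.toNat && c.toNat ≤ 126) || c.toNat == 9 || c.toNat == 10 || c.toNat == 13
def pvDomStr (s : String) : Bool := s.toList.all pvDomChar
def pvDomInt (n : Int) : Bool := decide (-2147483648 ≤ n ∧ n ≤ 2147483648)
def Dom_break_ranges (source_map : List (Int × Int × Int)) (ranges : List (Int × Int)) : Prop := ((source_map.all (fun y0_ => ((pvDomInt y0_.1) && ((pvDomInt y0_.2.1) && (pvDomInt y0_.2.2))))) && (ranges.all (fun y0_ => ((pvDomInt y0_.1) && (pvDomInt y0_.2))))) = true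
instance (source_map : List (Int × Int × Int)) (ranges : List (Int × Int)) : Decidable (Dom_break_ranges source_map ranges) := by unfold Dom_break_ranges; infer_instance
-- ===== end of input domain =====

-- B replaces A's explicit worklist stack by a recursive fragment splitter (same return
-- value; like A it empties the caller's `ranges` list — the proof is about the return value).
-- On some inputs whose map has a reversed interval both Python programs loop forever;
-- Pre_ excludes inputs that can diverge (see the comment above Pre_break_ranges).
-- The Lean ports use a fuel counter as a totality device; under Pre_ the supplied fuel is
-- proven sufficient, so the fuel-exhausted branches are unreachable on admitted inputs.

-- fuel bounds (weights of ranges); used by both ports as their fuel supply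
def pvW (p : Int × Int) : Nat := 2 * (p.2 - p.1).toNat + 1
def pvM (ranges : List (Int × Int)) : Nat := (ranges.map pvW).sum
def pvFuel (s e : Int) : Nat := (e - s).toNat + 1

-- ===== PORT A =====
-- the inner `for … break` loop of A: scans source_map, first matching branch fires;
-- returns (ranges, retranges, found) exactly as A leaves those variables
def innerA (sm : List (Int × Int × Int)) (start e : Int)
    (ranges ret : List (Int × Int)) : List (Int × Int) × List (Int × Int) × Bool :=
  match sm with
  | [] => (ranges, ret, false)
  | (ss, se, sh) :: rest =>
    if ss ≤ start ∧ se ≥ e then (ranges, ret ++ [(start + sh, e + sh)], true)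
    else if ss > start ∧ se < e then
      (ranges ++ [(start, ss - 1), (se + 1, e)], ret ++ [(ss + sh, se + sh)], true)
    else if start < ss ∧ ss ≤ e ∧ e ≤ se then
      (ranges ++ [(start, ss - 1)], ret ++ [(ss + sh, e + sh)], true)
    else if ss ≤ start ∧ start ≤ se ∧ se < e then
      (ranges ++ [(se + 1, e)], ret ++ [(start + sh, se + sh)], true)
    else innerA rest start e ranges ret

-- A's `while len(ranges) > 0` loop: pop from the end, scan, push fragments back
def aLoop (sm : List (Int × Int × Int)) : Nat → List (Int × Int) → List (Int × Int) → List (Int × Int)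
  | 0, _, ret => ret  -- fuel guard only; unreachable under Pre_ with the fuel break_ranges supplies
  | f + 1, ranges, ret =>
    if h : ranges = [] then ret
    else
      match innerA sm (ranges.getLast h).1 (ranges.getLast h).2 ranges.dropLast ret with
      | (ranges', ret', found) =>
        if found then aLoop sm f ranges' ret'
        else aLoop sm f ranges' (ret' ++ [ranges.getLast h])

def break_ranges (source_map : List (Int × Int × Int)) (ranges : List (Int × Int)) : List (Int × Int) :=
  aLoop source_map (pvM ranges) ranges []

-- ===== PORT B =====
-- Source B's `overlaps(item, start, end)`
def pvOverlaps (t : Int × Int × Int) (s e : Int) : Bool :=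
  let (ss, se, _) := t
  (decide (ss ≤ s) && decide (se ≥ e)) || (decide (ss > s) && decide (se < e)) ||
  (decide (s < ss) && decide (ss ≤ e) && decide (e ≤ se)) ||
  (decide (ss ≤ s) && decide (s ≤ se) && decide (se < e))

-- Source B's recursive `process(start, end)`: first overlapping entry, then dispatch
def procB (sm : List (Int × Int × Int)) : Nat → Int → Int → List (Int × Int)
  | 0, _, _ => []  -- fuel guard only; unreachable under Pre_ with the fuel supplied below
  | f + 1, s, e =>
    match sm.find? (fun t => pvOverlaps t s e) with
    | none => [(s, e)]
    | some (ss, se, sh) =>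
      if ss ≤ s ∧ se ≥ e then [(s + sh, e + sh)]
      else if ss > s ∧ se < e then
        (ss + sh, se + sh) :: (procB sm f (se + 1) e ++ procB sm f s (ss - 1))
      else if ss > s then (ss + sh, e + sh) :: procB sm f s (ss - 1)
      else (s + sh, se + sh) :: procB sm f (se + 1) e

-- Source B's `while ranges: … out.extend(process(start, end))`
def altLoop (sm : List (Int × Int × Int)) (ranges out : List (Int × Int)) : List (Int × Int) :=
  if h : ranges = [] then out
  else
    let p := ranges.getLast h
    altLoop sm ranges.dropLast (out ++ procB sm (pvFuel p.1 p.2) p.1 p.2)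
termination_by ranges.length
decreasing_by
  have := List.length_pos_iff.mpr h
  simp [List.length_dropLast]; omega

def break_ranges_alt (source_map : List (Int × Int × Int)) (ranges : List (Int × Int)) : List (Int × Int) :=
  altLoop source_map ranges []

-- ===== PRECONDITION & SPEC =====
-- r's first overlapping map entry, if any, covers r fully (so processing r never splits)
def pvTriv (sm : List (Int × Int × Int)) (r : Int × Int) : Bool :=
  match sm.find? (fun t => pvOverlaps t r.1 r.2) with
  | none => true
  | some (ss, se, _) => decide (ss ≤ r.1 ∧ se ≥ r.2)

-- Pre_ excludes inputs on which the splitting loop of A (and B's recursion) may re-create a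
-- popped range forever and diverge (possible only via a reversed map interval, e.g.
-- {(5, 3): 2} with range (0, 6)): it admits inputs whose map intervals are all ordered
-- (up to s_start = s_end + 1) and inputs whose ranges are never split; some excluded inputs
-- with reversed intervals do terminate, and there both programs agree anyway (see cites).
def Pre_break_ranges (source_map : List (Int × Int × Int)) (ranges : List (Int × Int)) : Prop :=
  (∀ t ∈ source_map, t.1 ≤ t.2.1 + 1) ∨ (∀ r ∈ ranges, pvTriv source_map r = true)
instance (source_map : List (Int × Int × Int)) (ranges : List (Int × Int)) : Decidable (Pre_break_ranges source_map ranges) := by unfold Pre_break_ranges; infer_instance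

def pvWitness_break_ranges : (List (Int × Int × Int)) × (List (Int × Int)) :=
  ([(0, 10, 5), (20, 30, -2)], [(2, 25), (-4, -1)])

def Spec_break_ranges (source_map : List (Int × Int × Int)) (ranges : List (Int × Int)) (out : List (Int × Int)) : Prop := out = break_ranges_alt source_map ranges
instance (source_map : List (Int × Int × Int)) (ranges : List (Int × Int)) (out : List (Int × Int)) : Decidable (Spec_break_ranges source_map ranges out) := by unfold Spec_break_ranges; infer_instance

-- ===== CLAIM (what is proved, stated in full; the proofs are below) =====
def Claim_equal_break_ranges : Prop := ∀ (source_map : List (Int × Int × Int)) (ranges : List (Int × Int)), Dom_break_ranges source_map ranges → Pre_break_ranges source_map ranges → Spec_break_ranges source_map ranges (break_ranges source_map ranges)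

-- ===== LEMMAS AND PROOFS =====

-- the common meaning of both loops: concatenation of processed fragments, last range first
def pvFlat (sm : List (Int × Int × Int)) (ranges : List (Int × Int)) : List (Int × Int) :=
  (ranges.reverse.map (fun p => procB sm (pvFuel p.1 p.2) p.1 p.2)).flatten

theorem pvFlat_concat (sm : List (Int × Int × Int)) (l : List (Int × Int)) (a : Int × Int) :
    pvFlat sm (l ++ [a]) = procB sm (pvFuel a.1 a.2) a.1 a.2 ++ pvFlat sm l := by
  simp [pvFlat]

theorem pvM_concat (l : List (Int × Int)) (xs : List (Int × Int)) :
    pvM (l ++ xs) = pvM l + pvM xs := by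
  simp [pvM]

theorem pvM_eq_zero {ranges : List (Int × Int)} (h : pvM ranges = 0) : ranges = [] := by
  cases ranges with
  | nil => rfl
  | cons a l => simp [pvM, pvW] at h

theorem innerA_find (sm : List (Int × Int × Int)) (s e : Int) (ranges ret : List (Int × Int)) :
    innerA sm s e ranges ret =
      match sm.find? (fun t => pvOverlaps t s e) with
      | none => (ranges, ret, false)
      | some (ss, se, sh) =>
        if ss ≤ s ∧ se ≥ e then (ranges, ret ++ [(s + sh, e + sh)], true)
        else if ss > s ∧ se < e then
          (ranges ++ [(s, ss - 1), (se + 1, e)], ret ++ [(ss + sh, se + sh)], true)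
        else if s < ss ∧ ss ≤ e ∧ e ≤ se then
          (ranges ++ [(s, ss - 1)], ret ++ [(ss + sh, e + sh)], true)
        else (ranges ++ [(se + 1, e)], ret ++ [(s + sh, se + sh)], true) := by
  induction sm with
  | nil => simp [innerA]
  | cons hd tl ih =>
    obtain ⟨ss, se, sh⟩ := hd
    by_cases hov : pvOverlaps (ss, se, sh) s e = true
    · simp only [List.find?_cons, hov]
      simp only [pvOverlaps, Bool.or_eq_true, Bool.and_eq_true, decide_eq_true_eq] at hov
      simp only [innerA]
      split_ifs <;> first | rfl | omega
    · simp only [List.find?_cons, (Bool.not_eq_true _).mp hov]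
      simp only [pvOverlaps, Bool.or_eq_true, Bool.and_eq_true, decide_eq_true_eq,
        not_or, not_and_or, not_lt, not_le] at hov
      simp only [innerA]
      split_ifs <;> first | exact ih | omega

theorem pvFlat_concat2 (sm : List (Int × Int × Int)) (l : List (Int × Int)) (a b : Int × Int) :
    pvFlat sm (l ++ [a, b]) = procB sm (pvFuel b.1 b.2) b.1 b.2 ++
      (procB sm (pvFuel a.1 a.2) a.1 a.2 ++ pvFlat sm l) := by
  simp [pvFlat]

theorem procB_fuel (sm : List (Int × Int × Int)) (hPre : ∀ t ∈ sm, t.1 ≤ t.2.1 + 1) :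
    ∀ f s e, pvFuel s e ≤ f → procB sm f s e = procB sm (pvFuel s e) s e := by
  intro f
  induction f using Nat.strong_induction_on with
  | _ f ih =>
    intro s e hf
    obtain ⟨f', rfl⟩ : ∃ f', f = f' + 1 := ⟨f - 1, by unfold pvFuel at hf; omega⟩
    rw [show pvFuel s e = (e - s).toNat + 1 from rfl]
    simp only [procB]
    cases hfind : sm.find? (fun t => pvOverlaps t s e) with
    | none => rfl
    | some t =>
      obtain ⟨ss, se, sh⟩ := t
      have hse : ss ≤ se + 1 := hPre _ (List.mem_of_find?_eq_some hfind)
      have hov : pvOverlaps (ss, se, sh) s e = true := List.find?_some (p := fun t => pvOverlaps t s e) hfind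
      simp only [pvOverlaps, Bool.or_eq_true, Bool.and_eq_true, decide_eq_true_eq] at hov
      have hf' : (e - s).toNat + 1 ≤ f' + 1 := hf
      by_cases c1 : ss ≤ s ∧ se ≥ e
      · simp [c1]
      by_cases c2 : ss > s ∧ se < e
      · simp only [if_neg c1, if_pos c2]
        have h1 : pvFuel (se + 1) e ≤ (e - s).toNat := by unfold pvFuel; omega
        have h2 : pvFuel s (ss - 1) ≤ (e - s).toNat := by unfold pvFuel; omega
        rw [ih f' (by omega) (se + 1) e (by omega), ih ((e - s).toNat) (by omega) (se + 1) e h1,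
            ih f' (by omega) s (ss - 1) (by omega), ih ((e - s).toNat) (by omega) s (ss - 1) h2]
      by_cases c3 : ss > s
      · simp only [if_neg c1, if_neg c2, if_pos c3]
        have h2 : pvFuel s (ss - 1) ≤ (e - s).toNat := by unfold pvFuel; omega
        rw [ih f' (by omega) s (ss - 1) (by omega), ih ((e - s).toNat) (by omega) s (ss - 1) h2]
      · simp only [if_neg c1, if_neg c2, if_neg c3]
        have h1 : pvFuel (se + 1) e ≤ (e - s).toNat := by unfold pvFuel; omega
        rw [ih f' (by omega) (se + 1) e (by omega), ih ((e - s).toNat) (by omega) (se + 1) e h1]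

theorem aLoop_eq (sm : List (Int × Int × Int)) (hPre : ∀ t ∈ sm, t.1 ≤ t.2.1 + 1) :
    ∀ f ranges ret, pvM ranges ≤ f → aLoop sm f ranges ret = ret ++ pvFlat sm ranges := by
  intro f
  induction f with
  | zero =>
    intro ranges ret h
    rw [pvM_eq_zero (Nat.le_zero.mp h)]
    simp [aLoop, pvFlat]
  | succ f ih =>
    intro ranges ret h
    rcases List.eq_nil_or_concat ranges with rfl | ⟨l, a, rfl⟩
    · simp [aLoop, pvFlat]
    · obtain ⟨s, e⟩ := a
      rw [List.concat_eq_append] at h ⊢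
      have hw : pvM (l ++ [(s, e)]) = pvM l + (2 * (e - s).toNat + 1) := by
        rw [pvM_concat]; rfl
      rw [hw] at h
      rw [show aLoop sm (f + 1) (l ++ [(s, e)]) ret =
            (match innerA sm ((l ++ [(s, e)]).getLast (by simp)).1
                ((l ++ [(s, e)]).getLast (by simp)).2 (l ++ [(s, e)]).dropLast ret with
             | (ranges', ret', found) =>
               if found then aLoop sm f ranges' ret'
               else aLoop sm f ranges' (ret' ++ [(l ++ [(s, e)]).getLast (by simp)])) from by
          simp only [aLoop]; rw [dif_neg (by simp)]]
      simp only [List.getLast_concat, List.dropLast_concat]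
      rw [innerA_find]
      have hFse : procB sm (pvFuel s e) s e = procB sm ((e - s).toNat + 1) s e := rfl
      cases hfind : sm.find? (fun t => pvOverlaps t s e) with
      | none =>
        have hB : procB sm (pvFuel s e) s e = [(s, e)] := by
          rw [hFse]; simp only [procB]; rw [hfind]
        rw [ih l (ret ++ [(s, e)]) (by omega), pvFlat_concat, hB]
        simp
      | some t =>
        obtain ⟨ss, se, sh⟩ := t
        have hse : ss ≤ se + 1 := hPre _ (List.mem_of_find?_eq_some hfind)
        have hov : pvOverlaps (ss, se, sh) s e = true := List.find?_some (p := fun t => pvOverlaps t s e) hfind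
        simp only [pvOverlaps, Bool.or_eq_true, Bool.and_eq_true, decide_eq_true_eq] at hov
        by_cases c1 : ss ≤ s ∧ se ≥ e
        · have hB : procB sm (pvFuel s e) s e = [(s + sh, e + sh)] := by
            rw [hFse]; simp only [procB]; rw [hfind]; simp [c1]
          simp only [if_pos c1]
          rw [ih l (ret ++ [(s + sh, e + sh)]) (by omega), pvFlat_concat, hB]
          simp
        · by_cases c2 : ss > s ∧ se < e
          · have h1 : pvFuel (se + 1) e ≤ (e - s).toNat := by unfold pvFuel; omega
            have h2 : pvFuel s (ss - 1) ≤ (e - s).toNat := by unfold pvFuel; omega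
            have hB : procB sm (pvFuel s e) s e = (ss + sh, se + sh) ::
                (procB sm (pvFuel (se + 1) e) (se + 1) e ++ procB sm (pvFuel s (ss - 1)) s (ss - 1)) := by
              rw [hFse]; simp only [procB]; rw [hfind]
              simp only [if_neg c1, if_pos c2]
              rw [procB_fuel sm hPre ((e - s).toNat) (se + 1) e h1,
                  procB_fuel sm hPre ((e - s).toNat) s (ss - 1) h2]
            simp only [if_neg c1, if_pos c2]
            have hM : pvM (l ++ [(s, ss - 1), (se + 1, e)]) ≤ f := by
              rw [pvM_concat]
              have hx : pvM [(s, ss - 1), (se + 1, e)] =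
                  (2 * (ss - 1 - s).toNat + 1) + (2 * (e - (se + 1)).toNat + 1) := by
                simp [pvM, pvW]
              rw [hx]; omega
            rw [ih (l ++ [(s, ss - 1), (se + 1, e)]) (ret ++ [(ss + sh, se + sh)]) hM,
                pvFlat_concat2, pvFlat_concat, hB]
            simp
          · by_cases c3 : s < ss ∧ ss ≤ e ∧ e ≤ se
            · have h2 : pvFuel s (ss - 1) ≤ (e - s).toNat := by unfold pvFuel; omega
              have hB : procB sm (pvFuel s e) s e = (ss + sh, e + sh) ::
                  procB sm (pvFuel s (ss - 1)) s (ss - 1) := by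
                rw [hFse]; simp only [procB]; rw [hfind]
                simp only [if_neg c1, if_neg c2, if_pos (show ss > s from c3.1)]
                rw [procB_fuel sm hPre ((e - s).toNat) s (ss - 1) h2]
              simp only [if_neg c1, if_neg c2, if_pos c3]
              have hM : pvM (l ++ [(s, ss - 1)]) ≤ f := by
                rw [pvM_concat]
                have hx : pvM [(s, ss - 1)] = 2 * (ss - 1 - s).toNat + 1 := by simp [pvM, pvW]
                rw [hx]; omega
              rw [ih (l ++ [(s, ss - 1)]) (ret ++ [(ss + sh, e + sh)]) hM, pvFlat_concat,
                  pvFlat_concat, hB]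
              simp
            · have c4 : ss ≤ s ∧ s ≤ se ∧ se < e := by omega
              have h1 : pvFuel (se + 1) e ≤ (e - s).toNat := by unfold pvFuel; omega
              have hB : procB sm (pvFuel s e) s e = (s + sh, se + sh) ::
                  procB sm (pvFuel (se + 1) e) (se + 1) e := by
                rw [hFse]; simp only [procB]; rw [hfind]
                simp only [if_neg c1, if_neg c2, if_neg (show ¬ss > s by omega)]
                rw [procB_fuel sm hPre ((e - s).toNat) (se + 1) e h1]
              simp only [if_neg c1, if_neg c2, if_neg c3]
              have hM : pvM (l ++ [(se + 1, e)]) ≤ f := by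
                rw [pvM_concat]
                have hx : pvM [(se + 1, e)] = 2 * (e - (se + 1)).toNat + 1 := by simp [pvM, pvW]
                rw [hx]; omega
              rw [ih (l ++ [(se + 1, e)]) (ret ++ [(s + sh, se + sh)]) hM, pvFlat_concat,
                  pvFlat_concat, hB]
              simp

theorem altLoop_eq (sm : List (Int × Int × Int)) :
    ∀ ranges out, altLoop sm ranges out = out ++ pvFlat sm ranges := by
  intro ranges
  induction ranges using List.reverseRecOn with
  | nil => intro out; rw [altLoop]; simp [pvFlat]
  | append_singleton l a ihl =>
    intro out
    obtain ⟨s, e⟩ := a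
    rw [altLoop]
    rw [dif_neg (by simp)]
    simp only [List.getLast_concat, List.dropLast_concat]
    rw [ihl, pvFlat_concat]
    simp

theorem aLoop_triv (sm : List (Int × Int × Int)) :
    ∀ f ranges ret, pvM ranges ≤ f → (∀ r ∈ ranges, pvTriv sm r = true) →
      aLoop sm f ranges ret = ret ++ pvFlat sm ranges := by
  intro f
  induction f with
  | zero =>
    intro ranges ret h _
    rw [pvM_eq_zero (Nat.le_zero.mp h)]
    simp [aLoop, pvFlat]
  | succ f ih =>
    intro ranges ret h htriv
    rcases List.eq_nil_or_concat ranges with rfl | ⟨l, a, rfl⟩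
    · simp [aLoop, pvFlat]
    · obtain ⟨s, e⟩ := a
      rw [List.concat_eq_append] at h htriv ⊢
      have hw : pvM (l ++ [(s, e)]) = pvM l + (2 * (e - s).toNat + 1) := by
        rw [pvM_concat]; rfl
      rw [hw] at h
      have htl : ∀ r ∈ l, pvTriv sm r = true := fun r hr => htriv r (by simp [hr])
      have hr : pvTriv sm (s, e) = true := htriv (s, e) (by simp)
      rw [show aLoop sm (f + 1) (l ++ [(s, e)]) ret =
            (match innerA sm ((l ++ [(s, e)]).getLast (by simp)).1
                ((l ++ [(s, e)]).getLast (by simp)).2 (l ++ [(s, e)]).dropLast ret with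
             | (ranges', ret', found) =>
               if found then aLoop sm f ranges' ret'
               else aLoop sm f ranges' (ret' ++ [(l ++ [(s, e)]).getLast (by simp)])) from by
          simp only [aLoop]; rw [dif_neg (by simp)]]
      simp only [List.getLast_concat, List.dropLast_concat]
      rw [innerA_find]
      have hFse : procB sm (pvFuel s e) s e = procB sm ((e - s).toNat + 1) s e := rfl
      unfold pvTriv at hr
      cases hfind : sm.find? (fun t => pvOverlaps t s e) with
      | none =>
        have hB : procB sm (pvFuel s e) s e = [(s, e)] := by
          rw [hFse]; simp only [procB]; rw [hfind]
        rw [ih l (ret ++ [(s, e)]) (by omega) htl, pvFlat_concat, hB]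
        simp
      | some t =>
        obtain ⟨ss, se, sh⟩ := t
        rw [hfind] at hr
        simp only [decide_eq_true_eq] at hr
        have hB : procB sm (pvFuel s e) s e = [(s + sh, e + sh)] := by
          rw [hFse]; simp only [procB]; rw [hfind]; simp [hr]
        simp only [if_pos hr]
        rw [ih l (ret ++ [(s + sh, e + sh)]) (by omega) htl, pvFlat_concat, hB]
        simp

-- ===== VERDICT (by name: the statement is the Claim_ definition above) =====
theorem break_ranges_spec : Claim_equal_break_ranges := by
  intro sm ranges _ hPre
  unfold Spec_break_ranges break_ranges break_ranges_alt
  rcases hPre with hPre | hPre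
  · rw [aLoop_eq sm hPre (pvM ranges) ranges [] le_rfl, altLoop_eq]
  · rw [aLoop_triv sm (pvM ranges) ranges [] le_rfl hPre, altLoop_eq]
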